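-- pv_equiv track=rewrite | github.com/rahulmatthan/statutes | scripts/parse_regulation_amendments.py | render_changes_yaml
-- ===== SOURCE A (Python) =====
-- def yaml_block_string(s: str | None) -> str:
--     if s is None:
--         return ""
--     s = s.strip()
--     s = s.replace("\\", "\\\\").replace('"', '\\"')
--     return f'"{s}"'
--
-- def render_changes_yaml(changes: list[dict]) -> str:
--     if not changes:
--         return "changes: []"
--     lines = ["changes:"]
--     for c in changes:
--         lines.append(f"  - kind: {c['kind']}")
--         target = c.get("target", "")
--         if target:
--             lines.append(f"    target: {yaml_block_string(target)}")
--         if c.get("before"):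
--             lines.append(f"    before: {yaml_block_string(c['before'])}")
--         if c.get("after"):
--             lines.append(f"    after: {yaml_block_string(c['after'])}")
--         if c.get("note"):
--             lines.append(f"    note: {yaml_block_string(c['note'])}")
--     return "\n".join(lines)
-- ===== SOURCE B (Python) =====
-- def yaml_block_string(s):
--     if s is None:
--         return ""
--     s = s.strip()
--     s = s.replace("\\", "\\\\").replace('"', '\\"')
--     return f'"{s}"'
--
--
-- def _render_from(changes, i):
--     """Render changes[i:] recursively, back-to-front, as one string of
--     '\n'-prefixed lines (no lines list, no join)."""
--     if i == len(changes):
--         return ""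
--     rest = _render_from(changes, i + 1)
--     c = changes[i]
--     for key in ("note", "after", "before", "target"):
--         v = c.get(key, "")
--         if v:
--             rest = "\n    " + key + ": " + yaml_block_string(v) + rest
--     return "\n  - kind: " + c["kind"] + rest
--
--
-- def render_changes_yaml(changes):
--     if not changes:
--         return "changes: []"
--     return "changes:" + _render_from(changes, 0)
-- ===== Notes on version B (the rewrite author's own statement) =====
-- stated objective: alternative
-- what changed: Replaces the iterative lines-list-then-join builder with a recursive back-to-front renderer that prepends each change's text (fields emitted by a reversed prepend loop) directly onto the already-rendered tail string, never materialising a list of lines.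
import Mathlib
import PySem

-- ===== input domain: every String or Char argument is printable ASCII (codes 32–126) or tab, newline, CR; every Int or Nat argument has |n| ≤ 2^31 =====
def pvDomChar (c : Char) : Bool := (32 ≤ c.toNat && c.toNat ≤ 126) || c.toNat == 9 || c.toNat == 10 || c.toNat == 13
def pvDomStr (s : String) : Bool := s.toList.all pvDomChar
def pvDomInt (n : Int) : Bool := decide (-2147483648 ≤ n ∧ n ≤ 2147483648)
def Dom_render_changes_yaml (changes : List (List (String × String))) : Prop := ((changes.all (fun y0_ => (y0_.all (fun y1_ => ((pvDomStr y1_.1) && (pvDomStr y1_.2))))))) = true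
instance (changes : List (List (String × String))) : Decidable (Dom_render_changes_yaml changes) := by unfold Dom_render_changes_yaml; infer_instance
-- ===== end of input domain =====

-- B renders recursively back-to-front, prepending each change's text directly onto the rendered
-- tail string instead of A's forward lines-list + join; same return value, no mutation.

-- ===== PORT A =====
-- dict lookup (first match on the association list, per the type convention)
def getS (c : List (String × String)) (k : String) : Option String :=
  (c.find? (fun p => p.1 == k)).map (fun p => p.2)

-- yaml_block_string (never called with None in either program)
def ybs (s : String) : String :=
  let s := PySem.Str.strip s
  let s := PySem.Str.replace (PySem.Str.replace s "\\" "\\\\") "\"" "\\\""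
  "\"" ++ s ++ "\""

-- loop body of A; `none` models the KeyError on a missing 'kind' (excluded by Pre_)
def bodyA (acc : Option (List String)) (c : List (String × String)) : Option (List String) :=
  match acc with
  | none => none
  | some lines =>
    match getS c "kind" with
    | none => none
    | some k =>
      let lines := lines ++ ["  - kind: " ++ k]
      let target := (getS c "target").getD ""
      let lines := if target ≠ "" then lines ++ ["    target: " ++ ybs target] else lines
      let before := (getS c "before").getD ""
      let lines := if before ≠ "" then lines ++ ["    before: " ++ ybs before] else lines
      let after := (getS c "after").getD ""
      let lines := if after ≠ "" then lines ++ ["    after: " ++ ybs after] else lines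
      let note := (getS c "note").getD ""
      let lines := if note ≠ "" then lines ++ ["    note: " ++ ybs note] else lines
      some lines

def render_changes_yaml (changes : List (List (String × String))) : String :=
  if changes = [] then "changes: []"
  else
    match changes.foldl bodyA (some ["changes:"]) with
    | some lines => PySem.Str.join "\n" lines
    | none => ""

-- ===== PORT B =====
def fieldsRevB : List String := ["note", "after", "before", "target"]

-- _render_from: renders the suffix recursively; `none` models the KeyError on a missing 'kind'
def renderFromB : List (List (String × String)) → Option String
  | [] => some ""
  | c :: cs =>
    match renderFromB cs with
    | none => none
    | some rest0 =>
      let rest := fieldsRevB.foldl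
        (fun r f =>
          let v := (getS c f).getD ""
          if v ≠ "" then "\n    " ++ f ++ ": " ++ ybs v ++ r else r) rest0
      match getS c "kind" with
      | none => none
      | some k => some ("\n  - kind: " ++ k ++ rest)

def render_changes_yaml_alt (changes : List (List (String × String))) : String :=
  if changes = [] then "changes: []"
  else
    match renderFromB changes with
    | some s => "changes:" ++ s
    | none => ""

-- ===== PRECONDITION & SPEC =====
-- Pre_ excludes exactly the inputs on which the Python A raises KeyError: a change dict without a 'kind' key.
def Pre_render_changes_yaml (changes : List (List (String × String))) : Prop :=
  (changes.all (fun c => c.any (fun p => p.1 == "kind"))) = true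
instance (changes : List (List (String × String))) : Decidable (Pre_render_changes_yaml changes) := by unfold Pre_render_changes_yaml; infer_instance
def pvWitness_render_changes_yaml : (List (List (String × String))) :=
  [[("kind", "substitution"), ("target", "section 2"), ("before", ""), ("note", " a\"b ")]]

def Spec_render_changes_yaml (changes : List (List (String × String))) (out : String) : Prop := out = render_changes_yaml_alt changes
instance (changes : List (List (String × String))) (out : String) : Decidable (Spec_render_changes_yaml changes out) := by unfold Spec_render_changes_yaml; infer_instance

-- ===== CLAIM (what is proved, stated in full; the proofs are below) =====
def Claim_equal_render_changes_yaml : Prop := ∀ (changes : List (List (String × String))), Dom_render_changes_yaml changes → Pre_render_changes_yaml changes → Spec_render_changes_yaml changes (render_changes_yaml changes)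

-- ===== LEMMAS AND PROOFS =====

-- proof helper: the string "\n"++l₀ ++ "\n"++l₁ ++ … for a list of lines
def prep : List String → String
  | [] => ""
  | l :: ls => "\n" ++ l ++ prep ls

theorem prep_append (a b : List String) : prep (a ++ b) = prep a ++ prep b := by
  induction a with
  | nil => simp [prep]
  | cons l ls ih => simp [prep, ih, String.append_assoc]

-- the lines A appends for one change
def chunkA? (c : List (String × String)) : Option (List String) := bodyA (some []) c

theorem bodyA_some (acc : List String) (c : List (String × String)) :
    bodyA (some acc) c = (chunkA? c).map (fun ch => acc ++ ch) := by
  simp only [bodyA, chunkA?]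
  cases getS c "kind" with
  | none => rfl
  | some k => split_ifs <;> simp

-- literal-merging helpers for the per-change step
theorem lit_kind (x : String) : "\n" ++ ("  - kind: " ++ x) = "\n  - kind: " ++ x := by
  rw [← String.append_assoc]; rfl
theorem lit_target (x : String) : "\n" ++ ("    target: " ++ x) = "\n    target: " ++ x := by
  rw [← String.append_assoc]; rfl
theorem lit_before (x : String) : "\n" ++ ("    before: " ++ x) = "\n    before: " ++ x := by
  rw [← String.append_assoc]; rfl
theorem lit_after (x : String) : "\n" ++ ("    after: " ++ x) = "\n    after: " ++ x := by
  rw [← String.append_assoc]; rfl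
theorem lit_note (x : String) : "\n" ++ ("    note: " ++ x) = "\n    note: " ++ x := by
  rw [← String.append_assoc]; rfl

-- per-change step of B equals prep of A's chunk, prepended
theorem stepB (c : List (String × String)) (rest : String) :
    (match getS c "kind" with
      | none => none
      | some k => some ("\n  - kind: " ++ k ++
          fieldsRevB.foldl (fun r f =>
            let v := (getS c f).getD ""
            if v ≠ "" then "\n    " ++ f ++ ": " ++ ybs v ++ r else r) rest))
    = (chunkA? c).map (fun ch => prep ch ++ rest) := by
  simp only [chunkA?, bodyA, fieldsRevB, List.foldl]
  cases getS c "kind" with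
  | none => rfl
  | some k =>
    simp only [Option.map_some]
    split_ifs <;>
      simp [prep, String.append_assoc, lit_kind, lit_target, lit_before, lit_after, lit_note]

-- B's recursion in terms of A's chunks
theorem foldl_bodyA_none (cs : List (List (String × String))) :
    cs.foldl bodyA none = none := by
  induction cs with
  | nil => rfl
  | cons c cs ih => simpa [bodyA] using ih

-- A's fold shifted by its accumulator
theorem foldl_bodyA_shift (cs : List (List (String × String))) (acc : List String) :
    cs.foldl bodyA (some acc) = (cs.foldl bodyA (some [])).map (fun L => acc ++ L) := by
  induction cs generalizing acc with
  | nil => simp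
  | cons c cs ih =>
    rw [List.foldl_cons, List.foldl_cons, bodyA_some, bodyA_some]
    cases chunkA? c with
    | none => simp [foldl_bodyA_none]
    | some ch => simp [ih (acc ++ ch), ih ch, Function.comp_def]

theorem renderFromB_step (c : List (String × String)) (cs : List (List (String × String))) :
    renderFromB (c :: cs) = match renderFromB cs with
      | none => none
      | some r => (chunkA? c).map (fun ch => prep ch ++ r) := by
  simp only [renderFromB]
  cases renderFromB cs with
  | none => rfl
  | some r => exact stepB c r

theorem renderFromB_eq (cs : List (List (String × String))) :
    renderFromB cs = (cs.foldl bodyA (some [])).map prep := by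
  induction cs with
  | nil => simp [renderFromB, prep]
  | cons c cs ih =>
    rw [renderFromB_step, ih, List.foldl_cons,
        show bodyA (some []) c = chunkA? c from rfl]
    cases hF : List.foldl bodyA (some []) cs with
    | none =>
      cases chunkA? c with
      | none => simp [foldl_bodyA_none]
      | some ch => simp [foldl_bodyA_shift, hF]
    | some L =>
      cases chunkA? c with
      | none => simp [foldl_bodyA_none]
      | some ch => simp [foldl_bodyA_shift, hF, prep_append]

-- join with "\n" of a nonempty list equals head ++ prep tail
theorem join_cons_prep (L : List String) : ∀ (a : String),
    PySem.Str.join "\n" (a :: L) = a ++ prep L := by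
  induction L with
  | nil =>
    intro a
    simp [PySem.Str.join, PySem.Chars.join_singleton, prep]
  | cons l L ih =>
    intro a
    have h2 : PySem.Str.join "\n" (a :: l :: L)
        = String.ofList (a.toList ++ "\n".toList ++
            PySem.Chars.join "\n".toList (l.toList :: L.map String.toList)) := by
      simp [PySem.Str.join, PySem.Chars.join_cons_cons]
    have h3 : PySem.Str.join "\n" (l :: L)
        = String.ofList (PySem.Chars.join "\n".toList (l.toList :: L.map String.toList)) := by
      simp [PySem.Str.join]
    rw [h2]
    simp only [String.ofList_append]
    rw [← h3, ih l]
    simp [prep, String.append_assoc]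

-- ===== VERDICT (by name: the statement is the Claim_ definition above) =====
theorem render_changes_yaml_spec : Claim_equal_render_changes_yaml := by
  intro changes _ _
  unfold Spec_render_changes_yaml render_changes_yaml render_changes_yaml_alt
  by_cases h : changes = []
  · simp [h]
  · rw [if_neg h, if_neg h, renderFromB_eq, foldl_bodyA_shift]
    cases changes.foldl bodyA (some []) with
    | none => rfl
    | some L => simp [join_cons_prep]
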